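-- pv_equiv track=rewrite | github.com/j091670s/Python-Limerick-Reader | LimerickChecker.py | findLastSyllable
-- ===== SOURCE A (Python) =====
-- def findLastSyllable(phonemes):
--     #pass
--
--     lastSyllablePosition = -1
--     for i in range(len(phonemes) -1, - 1, - 1):
--         if phonemes[i][-1].isdigit():
--             lastSyllablePosition = i
--             break
--
--     if lastSyllablePosition == -1:
--         return ""
--
--
--     endSyllable = ""
--     for i in range (lastSyllablePosition, len(phonemes)):
--         phoneme = phonemes[i]
--
--         if phoneme[-1].isdigit():
--             phoneme = phoneme[:-1]
--         endSyllable += phoneme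
--
--     return endSyllable
-- ===== SOURCE B (Python) =====
-- def findLastSyllable(phonemes):
--     parts = []
--     for phoneme in reversed(phonemes):
--         if phoneme[-1].isdigit():
--             parts.append(phoneme[:-1])
--             return ''.join(reversed(parts))
--         parts.append(phoneme)
--     return ""
-- ===== Notes on version B (the rewrite author's own statement) =====
-- stated objective: simpler
-- what changed: B replaces A's two index-based passes (a backward scan to locate the last digit-ending phoneme, then a forward indexed rebuild from that position) with one backward traversal over reversed(phonemes) that collects the pieces as it goes and returns as soon as the digit-ending phoneme is found.
import Mathlib
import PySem

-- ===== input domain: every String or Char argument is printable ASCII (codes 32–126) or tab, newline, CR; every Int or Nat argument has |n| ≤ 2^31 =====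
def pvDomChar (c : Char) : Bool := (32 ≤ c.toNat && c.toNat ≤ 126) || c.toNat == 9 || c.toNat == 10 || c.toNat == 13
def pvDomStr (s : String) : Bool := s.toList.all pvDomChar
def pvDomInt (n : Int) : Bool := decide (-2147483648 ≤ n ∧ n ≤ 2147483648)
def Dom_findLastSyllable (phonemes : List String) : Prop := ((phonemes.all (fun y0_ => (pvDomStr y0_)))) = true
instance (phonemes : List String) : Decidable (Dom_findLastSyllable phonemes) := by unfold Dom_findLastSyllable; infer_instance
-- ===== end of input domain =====

-- B fuses A's backward position search and forward rebuild into ONE backward loop that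
-- collects the pieces as it scans and stops at the first digit-ending phoneme (objective: simpler).

-- shared helper: `p[-1].isdigit()` (both Pythons perform exactly this test; on an empty
-- string Python raises IndexError — those inputs are excluded by Pre_, the port defaults to ' ')
def pvEndsDigit (p : String) : Bool := PySem.Str.isdigit ((PySem.Str.pyGet? p (-1)).getD ' ')

-- ===== PORT A =====
-- first loop of A: `for i in range(len(phonemes)-1, -1, -1): if phonemes[i][-1].isdigit(): lastSyllablePosition = i; break`
def pvFindPosLoop (phonemes : List String) : List Int → Int
  | [] => -1
  | i :: rest =>
      if pvEndsDigit ((PySem.List.pyGet? phonemes i).getD "") then i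
      else pvFindPosLoop phonemes rest

-- second loop of A: `endSyllable += phoneme` modelled on List Char (String.mk at the end);
-- `phoneme[:-1]` is PySem.List.slice … (-1) on the char list (exact)
def pvBuildLoop (phonemes : List String) (idxs : List Int) : List Char :=
  idxs.foldl (fun acc i =>
    let p := (PySem.List.pyGet? phonemes i).getD ""
    acc ++ (if pvEndsDigit p then PySem.List.slice p.toList none (some (-1)) else p.toList)) []

def findLastSyllable (phonemes : List String) : String :=
  let n : Int := phonemes.length
  let lastSyllablePosition := pvFindPosLoop phonemes (PySem.List.pyRange (n - 1) (-1) (-1))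
  if lastSyllablePosition = -1 then ""
  else String.mk (pvBuildLoop phonemes (PySem.List.pyRange lastSyllablePosition n 1))

-- ===== PORT B =====
-- `parts.append(…)` followed by the final `''.join(reversed(parts))` is modelled by consing
-- onto `parts` (so `parts` is already the reversed list) and flattening; `phoneme[:-1]` = dropLast (exact)
def pvAltLoop : List String → List (List Char) → String
  | [], _ => ""
  | phoneme :: rest, parts =>
      if pvEndsDigit phoneme then String.mk ((phoneme.toList.dropLast :: parts).flatten)
      else pvAltLoop rest (phoneme.toList :: parts)

def findLastSyllable_alt (phonemes : List String) : String :=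
  pvAltLoop phonemes.reverse []

-- ===== PRECONDITION & SPEC =====
-- Pre_ excludes exactly the inputs on which A raises IndexError (`p[-1]` on an empty phoneme
-- reached by the backward scan, i.e. an empty phoneme with no later digit-ending phoneme);
-- B raises there too.
def Pre_findLastSyllable (phonemes : List String) : Prop :=
  ∀ i < phonemes.length, phonemes.getD i "" = "" →
    ∃ j < phonemes.length, i < j ∧ pvEndsDigit (phonemes.getD j "") = true
instance (phonemes : List String) : Decidable (Pre_findLastSyllable phonemes) := by
  unfold Pre_findLastSyllable; infer_instance

def pvWitness_findLastSyllable : List String := ["K", "AE1", "T"]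

def Spec_findLastSyllable (phonemes : List String) (out : String) : Prop := out = findLastSyllable_alt phonemes
instance (phonemes : List String) (out : String) : Decidable (Spec_findLastSyllable phonemes out) := by unfold Spec_findLastSyllable; infer_instance

-- ===== CLAIM (what is proved, stated in full; the proofs are below) =====
def Claim_equal_findLastSyllable : Prop := ∀ (phonemes : List String), Dom_findLastSyllable phonemes → Pre_findLastSyllable phonemes → Spec_findLastSyllable phonemes (findLastSyllable phonemes)

-- ===== LEMMAS AND PROOFS =====

-- proof-side abbreviations for the two components of A
def pvPosOf (phonemes : List String) : Int :=
  pvFindPosLoop phonemes (PySem.List.pyRange ((phonemes.length : Int) - 1) (-1) (-1))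

-- common functional core: result of the scan over the REVERSED phoneme list
def pvSpec : List String → Option (List Char)
  | [] => none
  | p :: rest =>
      if pvEndsDigit p then some p.toList.dropLast
      else (pvSpec rest).map (· ++ p.toList)

-- the descending index list of A's first loop, in closed form
theorem pvDown_eq (n : Nat) :
    PySem.List.pyRange ((n : Int) - 1) (-1) (-1) = (List.range n).map (fun k : Nat => (n : Int) - 1 - (k : Int)) := by
  cases n with
  | zero => simp [PySem.List.pyRange]
  | succ m =>
      simp only [PySem.List.pyRange]
      rw [if_neg (by norm_num), if_neg (by norm_num), if_pos (by push_cast; omega)]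
      have hc : (((m + 1 : Nat) : Int) - 1 - (-1) + -(-1) - 1) / -(-1) = ((m + 1 : Nat) : Int) := by
        push_cast
        rw [Int.ediv_one]; ring
      rw [hc]
      simp only [Int.toNat_natCast]
      apply List.map_congr_left
      intro k hk
      push_cast; ring

theorem pvSlice_neg_one (cs : List Char) :
    PySem.List.slice cs none (some (-1)) = cs.dropLast := by
  have h := PySem.Str.slice_to_neg_one (String.mk cs)
  have ht : (String.mk cs).toList = cs := String.ofList_eq.mp rfl |>.symm
  simpa [PySem.Str.slice, ht] using h

-- piece appended by A's second loop at index i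
def pvPiece (phonemes : List String) (i : Int) : List Char :=
  let p := (PySem.List.pyGet? phonemes i).getD ""
  if pvEndsDigit p then PySem.List.slice p.toList none (some (-1)) else p.toList

theorem pvBuildLoop_eq_flatMap (phonemes : List String) (idxs : List Int) :
    pvBuildLoop phonemes idxs = idxs.flatMap (pvPiece phonemes) := by
  simpa [pvBuildLoop, pvPiece] using
    PySem.List.foldl_append_eq_flatMap (pvPiece phonemes) idxs []

theorem pvFindPosLoop_congr (xs : List String) (x : String) (idxs : List Int)
    (h : ∀ i ∈ idxs, 0 ≤ i ∧ i < (xs.length : Int)) :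
    pvFindPosLoop (xs ++ [x]) idxs = pvFindPosLoop xs idxs := by
  induction idxs with
  | nil => rfl
  | cons i rest ih =>
      obtain ⟨h0, hlt⟩ := h i (List.mem_cons_self ..)
      have hi : PySem.List.pyGet? (xs ++ [x]) i = PySem.List.pyGet? xs i := by
        obtain ⟨k, rfl⟩ : ∃ k : Nat, i = (k : Int) := ⟨i.toNat, (Int.toNat_of_nonneg h0).symm⟩
        rw [PySem.List.pyGet?_natCast, PySem.List.pyGet?_natCast,
          List.getElem?_append_left (by exact_mod_cast hlt)]
      simp only [pvFindPosLoop, hi]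
      split
      · rfl
      · exact ih (fun j hj => h j (List.mem_cons_of_mem _ hj))

theorem pvGet_last (xs : List String) (x : String) :
    (PySem.List.pyGet? (xs ++ [x]) ((xs.length : Int))).getD "" = x := by
  rw [PySem.List.pyGet?_natCast]
  simp

-- main invariant: A's two loops compute exactly pvSpec of the reversed list
theorem pvA_spec (phonemes : List String) :
    (pvSpec phonemes.reverse = none → pvPosOf phonemes = -1) ∧
    (∀ cs, pvSpec phonemes.reverse = some cs →
      0 ≤ pvPosOf phonemes ∧ pvPosOf phonemes < (phonemes.length : Int) ∧
      pvBuildLoop phonemes (PySem.List.pyRange (pvPosOf phonemes) (phonemes.length : Int) 1) = cs) := by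
  induction phonemes using List.reverseRecOn with
  | nil =>
      refine ⟨fun _ => ?_, fun cs hcs => by simp [pvSpec] at hcs⟩
      simp [pvPosOf, PySem.List.pyRange, pvFindPosLoop]
  | append_singleton xs x ih =>
      have hlen : ((xs ++ [x]).length : Int) = (xs.length : Int) + 1 := by
        simp
      have hdown : PySem.List.pyRange (((xs ++ [x]).length : Int) - 1) (-1) (-1)
          = ((xs.length : Int)) :: PySem.List.pyRange ((xs.length : Int) - 1) (-1) (-1) := by
        rw [hlen]
        have h1 := pvDown_eq (xs.length + 1)
        push_cast at h1
        rw [h1, pvDown_eq xs.length, List.range_succ_eq_map]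
        simp only [List.map_cons, List.map_map]
        congr 1
        · push_cast; ring
        · apply List.map_congr_left
          intro k hk
          simp only [Function.comp]
          push_cast; ring
      have hpos : pvPosOf (xs ++ [x]) =
          if pvEndsDigit x then ((xs.length : Int))
          else pvFindPosLoop (xs ++ [x]) (PySem.List.pyRange ((xs.length : Int) - 1) (-1) (-1)) := by
        rw [pvPosOf, hdown]
        simp only [pvFindPosLoop, pvGet_last]
      by_cases hd : pvEndsDigit x
      · -- the last phoneme ends in a digit: position is the last index, one-piece build
        have hpos' : pvPosOf (xs ++ [x]) = ((xs.length : Int)) := by rw [hpos, if_pos hd]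
        refine ⟨fun hnone => ?_, fun cs hcs => ?_⟩
        · simp [pvSpec, hd] at hnone
        · simp only [List.reverse_append, List.reverse_singleton, List.singleton_append,
            pvSpec, hd, if_pos, Option.some.injEq] at hcs
          refine ⟨by rw [hpos']; positivity, by rw [hpos', hlen]; omega, ?_⟩
          rw [hpos', hlen]
          have hr : PySem.List.pyRange ((xs.length : Int)) ((xs.length : Int) + 1) 1
              = [((xs.length : Int))] := by
            rw [PySem.List.pyRange_one_cons (by omega)]
            have : PySem.List.pyRange ((xs.length : Int) + 1) ((xs.length : Int) + 1) 1 = [] := by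
              simp [PySem.List.pyRange]
            rw [this]
          rw [hr, pvBuildLoop_eq_flatMap]
          simp only [List.flatMap_cons, List.flatMap_nil, List.append_nil]
          rw [← hcs]
          simp [pvPiece, hd, pvSlice_neg_one]
      · -- the last phoneme does not end in a digit: recurse into xs
        have hmem : ∀ i ∈ PySem.List.pyRange ((xs.length : Int) - 1) (-1) (-1),
            0 ≤ i ∧ i < (xs.length : Int) := by
          intro i hi
          rw [pvDown_eq xs.length] at hi
          simp only [List.mem_map, List.mem_range] at hi
          obtain ⟨k, hk, rfl⟩ := hi
          omega
        have hpos' : pvPosOf (xs ++ [x]) = pvPosOf xs := by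
          rw [hpos, if_neg hd, pvFindPosLoop_congr xs x _ hmem, pvPosOf]
        refine ⟨fun hnone => ?_, fun cs hcs => ?_⟩
        · rw [hpos']
          apply ih.1
          simp only [List.reverse_append, List.reverse_singleton, List.singleton_append,
            pvSpec, hd] at hnone
          simp only [Bool.false_eq_true, if_false, Option.map_eq_none_iff] at hnone
          exact hnone
        · simp only [List.reverse_append, List.reverse_singleton, List.singleton_append,
            pvSpec, hd, Bool.false_eq_true, if_false, Option.map_eq_some_iff] at hcs
          obtain ⟨cs0, hcs0, rfl⟩ := hcs
          obtain ⟨h0, hlt, hbuild⟩ := ih.2 cs0 hcs0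
          refine ⟨by rw [hpos']; exact h0, by rw [hpos', hlen]; omega, ?_⟩
          rw [hpos', hlen,
            PySem.List.pyRange_one_succ_right (by omega),
            pvBuildLoop_eq_flatMap, List.flatMap_append]
          rw [pvBuildLoop_eq_flatMap] at hbuild
          have hcongr : (PySem.List.pyRange (pvPosOf xs) ((xs.length : Int)) 1).flatMap
              (pvPiece (xs ++ [x]))
              = (PySem.List.pyRange (pvPosOf xs) ((xs.length : Int)) 1).flatMap (pvPiece xs) := by
            apply List.flatMap_congr
            intro i hi
            rw [PySem.List.mem_pyRange_one] at hi
            obtain ⟨k, rfl⟩ : ∃ k : Nat, i = (k : Int) :=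
              ⟨i.toNat, (Int.toNat_of_nonneg (le_trans h0 hi.1)).symm⟩
            have : k < xs.length := by exact_mod_cast hi.2
            simp [pvPiece, PySem.List.pyGet?_natCast, List.getElem?_append_left this]
          rw [hcongr, hbuild]
          simp only [List.flatMap_cons, List.flatMap_nil, List.append_nil]
          simp [pvPiece, hd]

-- B's loop computes pvSpec with the collected parts appended
theorem pvAltLoop_spec (r : List String) (parts : List (List Char)) :
    pvAltLoop r parts =
      match pvSpec r with
      | none => ""
      | some cs => String.mk (cs ++ parts.flatten) := by
  induction r generalizing parts with
  | nil => rfl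
  | cons p rest ih =>
      by_cases hd : pvEndsDigit p
      · simp [pvAltLoop, pvSpec, hd]
      · simp only [pvAltLoop, pvSpec, hd, Bool.false_eq_true, if_false]
        rw [ih (p.toList :: parts)]
        cases pvSpec rest with
        | none => rfl
        | some cs => simp

theorem pv_main (phonemes : List String) :
    findLastSyllable phonemes = findLastSyllable_alt phonemes := by
  have hA := pvA_spec phonemes
  rw [findLastSyllable_alt, pvAltLoop_spec phonemes.reverse []]
  show (if pvPosOf phonemes = -1 then ""
    else String.mk (pvBuildLoop phonemes (PySem.List.pyRange (pvPosOf phonemes) (phonemes.length : Int) 1)))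
    = _
  cases hspec : pvSpec phonemes.reverse with
  | none => rw [if_pos (hA.1 hspec)]
  | some cs =>
      obtain ⟨h0, _, hbuild⟩ := hA.2 cs hspec
      rw [if_neg (by omega), hbuild]
      simp

-- ===== VERDICT (by name: the statement is the Claim_ definition above) =====
theorem findLastSyllable_spec : Claim_equal_findLastSyllable := by
  intro phonemes _ _
  unfold Spec_findLastSyllable
  exact pv_main phonemes
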